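-- pv_equiv track=rewrite | github.com/cirosantilli/project-euler-solvers | solvers/646.py | precompute_powers
-- ===== SOURCE A (Python) =====
-- def precompute_powers(p: int, e: int, mod: int | None):
--     """
--     Precompute:
--       pow_val[k]  = p^k (positive integer)
--       pow_coef[k] = (-p)^k  (mod M if mod provided, else exact integer)
--     Note: f(d)=lambda(d)*d is completely multiplicative and f(p^k)=(-p)^k.
--     """
--     pow_val = [1] * (e + 1)
--     pow_coef = [1] * (e + 1)
--     if mod is None:
--         for k in range(1, e + 1):
--             pow_val[k] = pow_val[k - 1] * p
--             pow_coef[k] = pow_coef[k - 1] * (-p)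
--     else:
--         negp = (mod - (p % mod)) % mod
--         for k in range(1, e + 1):
--             pow_val[k] = pow_val[k - 1] * p
--             pow_coef[k] = (pow_coef[k - 1] * negp) % mod
--     return pow_val, pow_coef
-- ===== SOURCE B (Python) =====
-- def precompute_powers(p, e, mod):
--     if e < 0:
--         return [], []
--     pow_val = [1]
--     v = 1
--     for _ in range(e):
--         v *= p
--         pow_val.append(v)
--     pow_coef = [1]
--     for k in range(1, e + 1):
--         c = pow_val[k] if k % 2 == 0 else -pow_val[k]
--         if mod is not None:
--             c %= mod
--         pow_coef.append(c)
--     return pow_val, pow_coef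
-- ===== Notes on version B (the rewrite author's own statement) =====
-- stated objective: alternative
-- what changed: B builds only the positive-power list with a single p-recurrence and then derives pow_coef in a separate pass from pow_val via (-p)^k = +/- p^k (reducing mod only for k>=1), instead of A's in-place updates of two preallocated lists with a second negp recurrence.
import Mathlib
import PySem

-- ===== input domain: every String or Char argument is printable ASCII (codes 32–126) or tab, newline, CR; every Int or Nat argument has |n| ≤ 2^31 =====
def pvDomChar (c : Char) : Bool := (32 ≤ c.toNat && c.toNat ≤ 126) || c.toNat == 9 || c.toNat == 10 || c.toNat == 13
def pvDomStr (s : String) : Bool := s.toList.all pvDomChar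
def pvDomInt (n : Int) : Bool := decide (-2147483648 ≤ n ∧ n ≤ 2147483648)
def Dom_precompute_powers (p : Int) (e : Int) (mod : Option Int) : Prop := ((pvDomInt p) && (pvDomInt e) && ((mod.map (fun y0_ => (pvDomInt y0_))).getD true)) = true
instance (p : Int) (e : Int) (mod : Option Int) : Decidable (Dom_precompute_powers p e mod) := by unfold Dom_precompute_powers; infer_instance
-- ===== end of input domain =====

-- B derives pow_coef from the already-built pow_val via (-p)^k = ±p^k (a second pass), instead of A's
-- in-place second recurrence over preallocated lists; objective: alternative decomposition, same cost.

-- ===== PORT A =====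
def precompute_powers (p : Int) (e : Int) (mod : Option Int) : List Int × List Int :=
  let pow_val := List.replicate (e + 1).toNat 1
  let pow_coef := List.replicate (e + 1).toNat 1
  match mod with
  | none =>
    (PySem.List.pyRange 1 (e + 1) 1).foldl
      (fun (st : List Int × List Int) k =>
        (st.1.set k.toNat (PySem.List.pyGetD st.1 (k - 1) 0 * p),
         st.2.set k.toNat (PySem.List.pyGetD st.2 (k - 1) 0 * (-p))))
      (pow_val, pow_coef)
  | some m =>
    let negp := PySem.Int.mod (m - PySem.Int.mod p m) m
    (PySem.List.pyRange 1 (e + 1) 1).foldl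
      (fun (st : List Int × List Int) k =>
        (st.1.set k.toNat (PySem.List.pyGetD st.1 (k - 1) 0 * p),
         st.2.set k.toNat (PySem.Int.mod (PySem.List.pyGetD st.2 (k - 1) 0 * negp) m)))
      (pow_val, pow_coef)

-- ===== PORT B =====
def precompute_powers_alt (p : Int) (e : Int) (mod : Option Int) : List Int × List Int :=
  if e < 0 then ([], []) else
  let pv := (PySem.List.pyRange 0 e 1).foldl
      (fun (st : List Int × Int) _ => (st.1 ++ [st.2 * p], st.2 * p)) ([1], 1)
  let pow_val := pv.1
  let pow_coef := (PySem.List.pyRange 1 (e + 1) 1).foldl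
      (fun acc k =>
        let c : Int := if PySem.Int.mod k 2 == 0 then PySem.List.pyGetD pow_val k 0
                       else -(PySem.List.pyGetD pow_val k 0)
        let c' : Int := match mod with | none => c | some m => PySem.Int.mod c m
        acc ++ [c']) [1]
  (pow_val, pow_coef)

-- ===== PRECONDITION & SPEC =====
-- Pre_ excludes only mod = some 0, where Python A raises ZeroDivisionError (p % 0).
def Pre_precompute_powers (p : Int) (e : Int) (mod : Option Int) : Prop := mod ≠ some 0
instance (p : Int) (e : Int) (mod : Option Int) : Decidable (Pre_precompute_powers p e mod) := by unfold Pre_precompute_powers; infer_instance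
def pvWitness_precompute_powers : Int × Int × Option Int := (2, 3, some 7)

def Spec_precompute_powers (p : Int) (e : Int) (mod : Option Int) (out : List Int × List Int) : Prop := out = precompute_powers_alt p e mod
instance (p : Int) (e : Int) (mod : Option Int) (out : List Int × List Int) : Decidable (Spec_precompute_powers p e mod out) := by unfold Spec_precompute_powers; infer_instance

-- ===== CLAIM (what is proved, stated in full; the proofs are below) =====
def Claim_equal_precompute_powers : Prop := ∀ (p : Int) (e : Int) (mod : Option Int), Dom_precompute_powers p e mod → Pre_precompute_powers p e mod → Spec_precompute_powers p e mod (precompute_powers p e mod)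

-- ===== LEMMAS AND PROOFS =====

def coefM (negp m : Int) : Nat → Int
  | 0 => 1
  | i + 1 => PySem.Int.mod (coefM negp m i * negp) m

theorem pymod_congr (b u v : Int) (hb : b ≠ 0) (h : b ∣ u - v) :
    PySem.Int.mod u b = PySem.Int.mod v b := by
  have hu := PySem.Int.floordiv_mul_add_mod u b
  have hv := PySem.Int.floordiv_mul_add_mod v b
  have hd : b ∣ PySem.Int.mod u b - PySem.Int.mod v b := by
    have heq : PySem.Int.mod u b - PySem.Int.mod v b
        = (u - v) - (PySem.Int.floordiv u b - PySem.Int.floordiv v b) * b := by ring_nf; omega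
    rw [heq]
    exact dvd_sub h (Dvd.intro_left _ rfl)
  have hd' : |b| ∣ PySem.Int.mod u b - PySem.Int.mod v b := (abs_dvd _ _).mpr hd
  have habs : |PySem.Int.mod u b - PySem.Int.mod v b| < |b| := by
    rcases lt_or_gt_of_ne hb with hneg | hpos
    · have h1 := PySem.Int.mod_neg_bounds (a := u) hneg
      have h2 := PySem.Int.mod_neg_bounds (a := v) hneg
      rw [abs_of_nonpos (le_of_lt hneg), abs_lt]; omega
    · have h1l := PySem.Int.mod_nonneg (a := u) hpos
      have h1r := PySem.Int.mod_lt (a := u) hpos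
      have h2l := PySem.Int.mod_nonneg (a := v) hpos
      have h2r := PySem.Int.mod_lt (a := v) hpos
      rw [abs_of_pos hpos, abs_lt]; omega
  have := Int.eq_zero_of_abs_lt_dvd hd' habs
  omega

theorem pymod_sub_self_dvd (m x : Int) : m ∣ PySem.Int.mod x m - x := by
  have h := PySem.Int.floordiv_mul_add_mod x m
  have heq : PySem.Int.mod x m - x = -(PySem.Int.floordiv x m) * m := by ring_nf; omega
  rw [heq]
  exact Dvd.intro_left _ rfl

theorem negp_dvd (p m : Int) : m ∣ PySem.Int.mod (m - PySem.Int.mod p m) m - (-p) := by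
  have h1 := pymod_sub_self_dvd m (m - PySem.Int.mod p m)
  have h2 : m ∣ (m - PySem.Int.mod p m) - (-p) := by
    have h3 : (m - PySem.Int.mod p m) - (-p) = m - (PySem.Int.mod p m - p) := by ring
    rw [h3]
    exact dvd_sub (dvd_refl m) (pymod_sub_self_dvd m p)
  have h4 : PySem.Int.mod (m - PySem.Int.mod p m) m - (-p)
      = (PySem.Int.mod (m - PySem.Int.mod p m) m - (m - PySem.Int.mod p m)) + ((m - PySem.Int.mod p m) - (-p)) := by ring
  rw [h4]
  exact dvd_add h1 h2

theorem coefM_eq (p m : Int) (hm : m ≠ 0) (i : Nat) (hi : 1 ≤ i) :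
    coefM (PySem.Int.mod (m - PySem.Int.mod p m) m) m i = PySem.Int.mod ((-p) ^ i) m := by
  induction i with
  | zero => omega
  | succ j ih =>
      rcases Nat.eq_zero_or_pos j with h0 | hj
      · subst h0
        show PySem.Int.mod (1 * PySem.Int.mod (m - PySem.Int.mod p m) m) m = _
        rw [one_mul, pow_one]
        exact pymod_congr m _ _ hm (negp_dvd p m)
      · have ihj := ih hj
        show PySem.Int.mod (coefM _ m j * _) m = _
        rw [ihj]
        apply pymod_congr m _ _ hm
        have h1 := pymod_sub_self_dvd m ((-p) ^ j)
        have h2 := negp_dvd p m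
        have heq : PySem.Int.mod ((-p) ^ j) m * PySem.Int.mod (m - PySem.Int.mod p m) m - (-p) ^ (j + 1)
            = (PySem.Int.mod ((-p) ^ j) m - (-p) ^ j) * PySem.Int.mod (m - PySem.Int.mod p m) m
              + (-p) ^ j * (PySem.Int.mod (m - PySem.Int.mod p m) m - (-p)) := by
          rw [pow_succ]; ring
        rw [heq]
        exact dvd_add (h1.mul_right _) (h2.mul_left _)

theorem A_loop (p : Int) (cstep : Int → Int) (cf : Nat → Int) (hc0 : cf 0 = 1)
    (hcs : ∀ i, cf (i + 1) = cstep (cf i)) (E : Nat) (m : Nat) (hm : m ≤ E) :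
    (PySem.List.pyRange 1 ((m : Int) + 1) 1).foldl
      (fun (st : List Int × List Int) k =>
        (st.1.set k.toNat (PySem.List.pyGetD st.1 (k - 1) 0 * p),
         st.2.set k.toNat (cstep (PySem.List.pyGetD st.2 (k - 1) 0))))
      (List.replicate (E + 1) 1, List.replicate (E + 1) 1)
    = ((List.range (m + 1)).map (fun i => p ^ i) ++ List.replicate (E - m) 1,
       (List.range (m + 1)).map cf ++ List.replicate (E - m) 1) := by
  induction m with
  | zero =>
      rw [PySem.List.pyRange_one_eq_nil (by norm_num)]
      simp [List.range_one, hc0, List.replicate_succ]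
  | succ n ih =>
      have h1 : ((n + 1 : Nat) : Int) + 1 = ((n : Int) + 1) + 1 := by push_cast; ring
      rw [h1, PySem.List.pyRange_one_succ_right (by omega), List.foldl_append, ih (by omega)]
      have hget : ∀ (g : Nat → Int),
          PySem.List.pyGetD ((List.range (n + 1)).map g ++ List.replicate (E - n) 1) ((n : Int) + 1 - 1) 0 = g n := by
        intro g
        have h2 : (n : Int) + 1 - 1 = ((n : Nat) : Int) := by ring
        rw [h2, PySem.List.pyGetD_natCast]
        rw [List.getD_eq_getElem?_getD, List.getElem?_append_left (by simp)]
        simp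
      have hset : ∀ (g : Nat → Int) (v : Int),
          ((List.range (n + 1)).map g ++ List.replicate (E - n) 1).set ((n : Int) + 1).toNat v
          = (List.range (n + 1)).map g ++ ([v] ++ List.replicate (E - (n + 1)) 1) := by
        intro g v
        have h3 : ((n : Int) + 1).toNat = n + 1 := by omega
        rw [h3, List.set_append_right _ _ (by simp)]
        have h4 : E - n = (E - (n + 1)) + 1 := by omega
        simp [h4, List.replicate_succ]
      simp only [List.foldl_cons, List.foldl_nil]
      rw [hget, hget, hset, hset]
      rw [List.range_succ (n := n + 1)]
      simp [hcs, pow_succ, mul_comm]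

theorem B_val (p : Int) (m : Nat) :
    (PySem.List.pyRange 0 (m : Int) 1).foldl
      (fun (st : List Int × Int) _ => (st.1 ++ [st.2 * p], st.2 * p)) ([1], 1)
    = ((List.range (m + 1)).map (fun i => p ^ i), p ^ m) := by
  induction m with
  | zero =>
      rw [PySem.List.pyRange_one_eq_nil (by norm_num)]
      simp [List.range_one]
  | succ n ih =>
      have h1 : ((n + 1 : Nat) : Int) = ((n : Int)) + 1 := by push_cast; ring
      rw [h1, PySem.List.pyRange_one_succ_right (by omega), List.foldl_append, ih]
      simp [List.range_succ, pow_succ]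

-- the index lookup used by B's second pass
theorem B_get (p : Int) (E j : Nat) (hj : j < E) :
    PySem.List.pyGetD ((List.range (E + 1)).map (fun i => p ^ i)) (1 + (j : Int)) 0 = p ^ (j + 1) := by
  have hc : 1 + (j : Int) = ((j + 1 : Nat) : Int) := by push_cast; ring
  rw [hc, PySem.List.pyGetD_natCast, List.getD_eq_getElem?_getD, List.getElem?_map,
    List.getElem?_range (by omega)]
  rfl

theorem main_eq (p : Int) (mod : Option Int) (hpre : mod ≠ some 0) (E : Nat) :
    precompute_powers p (E : Int) mod = precompute_powers_alt p (E : Int) mod := by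
  have hnn : ¬ ((E : Int) < 0) := by omega
  have htN : (((E : Int)) + 1).toNat = E + 1 := by omega
  cases mod with
  | none =>
      simp only [precompute_powers, precompute_powers_alt, htN, if_neg hnn]
      rw [A_loop p (fun c => c * (-p)) (fun i => (-p) ^ i) (pow_zero _)
            (fun i => by show (-p) ^ (i+1) = (-p) ^ i * (-p); rw [pow_succ]) E E le_rfl]
      rw [B_val p E]
      rw [PySem.List.foldl_append_singleton_eq_map
        (f := fun k => if (PySem.Int.mod k 2 == 0) = true
              then PySem.List.pyGetD ((List.range (E + 1)).map (fun i => p ^ i)) k 0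
              else -PySem.List.pyGetD ((List.range (E + 1)).map (fun i => p ^ i)) k 0)]
      rw [PySem.List.pyRange_one]
      have hE : (((E : Int) + 1) - 1).toNat = E := by omega
      rw [hE, List.map_map]
      simp only [Nat.sub_self, List.replicate_zero, List.append_nil, Prod.mk.injEq]
      refine ⟨by trivial, ?_⟩
      rw [List.singleton_append]
      conv_lhs => rw [List.range_succ_eq_map, List.map_cons, List.map_map]
      refine List.cons_eq_cons.mpr ⟨by simp, ?_⟩
      apply List.map_congr_left
      intro j hj
      rw [List.mem_range] at hj
      simp only [Function.comp_apply]
      rw [B_get p E j hj]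
      rcases Nat.even_or_odd (j + 1) with hpar | hpar
      · have h2 : PySem.Int.mod (1 + (j : Int)) 2 = 0 := by
          rw [PySem.Int.mod_eq_emod_of_pos (by norm_num)]
          have : Even (1 + (j : Int)) := by
            have := (Int.even_coe_nat (j + 1)).mpr hpar
            convert this using 1; push_cast; ring
          exact Int.even_iff.mp this
        have hb : (PySem.Int.mod (1 + (j : Int)) 2 == 0) = true := by rw [h2]; rfl
        rw [hb]
        simp [hpar.neg_pow]
      · have h2 : PySem.Int.mod (1 + (j : Int)) 2 = 1 := by
          rw [PySem.Int.mod_eq_emod_of_pos (by norm_num)]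
          have : Odd (1 + (j : Int)) := by
            have := (Int.odd_coe_nat (j + 1)).mpr hpar
            convert this using 1; push_cast; ring
          exact Int.odd_iff.mp this
        have hb : (PySem.Int.mod (1 + (j : Int)) 2 == 0) = false := by rw [h2]; rfl
        rw [hb]
        simp [hpar.neg_pow]
  | some m =>
      have hm : m ≠ 0 := by simpa using hpre
      simp only [precompute_powers, precompute_powers_alt, htN, if_neg hnn]
      rw [A_loop p (fun c => PySem.Int.mod (c * PySem.Int.mod (m - PySem.Int.mod p m) m) m)
            (coefM (PySem.Int.mod (m - PySem.Int.mod p m) m) m) rfl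
            (fun i => rfl) E E le_rfl]
      rw [B_val p E]
      rw [PySem.List.foldl_append_singleton_eq_map
        (f := fun k => PySem.Int.mod (if (PySem.Int.mod k 2 == 0) = true
              then PySem.List.pyGetD ((List.range (E + 1)).map (fun i => p ^ i)) k 0
              else -PySem.List.pyGetD ((List.range (E + 1)).map (fun i => p ^ i)) k 0) m)]
      rw [PySem.List.pyRange_one]
      have hE : (((E : Int) + 1) - 1).toNat = E := by omega
      rw [hE, List.map_map]
      simp only [Nat.sub_self, List.replicate_zero, List.append_nil, Prod.mk.injEq]
      refine ⟨by trivial, ?_⟩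
      rw [List.singleton_append]
      conv_lhs => rw [List.range_succ_eq_map, List.map_cons, List.map_map]
      refine List.cons_eq_cons.mpr ⟨by simp [coefM], ?_⟩
      apply List.map_congr_left
      intro j hj
      rw [List.mem_range] at hj
      simp only [Function.comp_apply]
      rw [B_get p E j hj]
      have hcoef := coefM_eq p m hm (j + 1) (by omega)
      rcases Nat.even_or_odd (j + 1) with hpar | hpar
      · have h2 : PySem.Int.mod (1 + (j : Int)) 2 = 0 := by
          rw [PySem.Int.mod_eq_emod_of_pos (by norm_num)]
          have : Even (1 + (j : Int)) := by
            have := (Int.even_coe_nat (j + 1)).mpr hpar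
            convert this using 1; push_cast; ring
          exact Int.even_iff.mp this
        have hb : (PySem.Int.mod (1 + (j : Int)) 2 == 0) = true := by rw [h2]; rfl
        simp only [Nat.succ_eq_add_one, hcoef, hpar.neg_pow]
        rw [hb]
        simp
      · have h2 : PySem.Int.mod (1 + (j : Int)) 2 = 1 := by
          rw [PySem.Int.mod_eq_emod_of_pos (by norm_num)]
          have : Odd (1 + (j : Int)) := by
            have := (Int.odd_coe_nat (j + 1)).mpr hpar
            convert this using 1; push_cast; ring
          exact Int.odd_iff.mp this
        have hb : (PySem.Int.mod (1 + (j : Int)) 2 == 0) = false := by rw [h2]; rfl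
        simp only [Nat.succ_eq_add_one, hcoef, hpar.neg_pow]
        rw [hb]
        simp

-- ===== VERDICT (by name: the statement is the Claim_ definition above) =====
theorem precompute_powers_spec : Claim_equal_precompute_powers := by
  intro p e mod _ hpre
  unfold Spec_precompute_powers
  by_cases he : e < 0
  · have h0 : (e + 1).toNat = 0 := by omega
    have hr : PySem.List.pyRange 1 (e + 1) 1 = [] := PySem.List.pyRange_one_eq_nil (by omega)
    cases mod with
    | none => simp [precompute_powers, precompute_powers_alt, h0, hr, he]
    | some m => simp [precompute_powers, precompute_powers_alt, h0, hr, he]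
  · obtain ⟨E, hE⟩ : ∃ E : Nat, e = (E : Int) := ⟨e.toNat, by omega⟩
    subst hE
    exact main_eq p mod hpre E
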